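-- pv_equiv track=rewrite | github.com/firephyz/BlifOptimizer | blifopt.py | combineImplicants
-- ===== SOURCE A (Python) =====
-- def countDontCares(implicant):
--   count = 0
--   for i in range(len(implicant)):
--     if implicant[i] == '-':
--       count += 1
--   return count
--
-- def combineImplicants(impA, impB):
--   """Combines two implicants."""
--   hasDiff = False
--   diffIndex = -1
--   doesCover = False
--   primaryImplicant = None
--   secondaryImplicant = None
--   if countDontCares(impA) >= countDontCares(impB):
--     primaryImplicant = impA
--     secondaryImplicant = impB
--   elif countDontCares(impA) < countDontCares(impB):
--     primaryImplicant = impB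
--     secondaryImplicant = impA
--
--   for i in range(len(impA)):
--     if impA[i] != impB[i]:
--       if secondaryImplicant[i] == '-':
--         return None
--       elif primaryImplicant[i] == '-':
--         if hasDiff:
--           return None
--         else:
--           doesCover = True
--       else:
--         if hasDiff:
--           return None
--         elif primaryImplicant[i] != '-':
--           if doesCover:
--             return None
--           else:
--             diffIndex = i
--             hasDiff = True
--   if hasDiff:
--     return primaryImplicant[:diffIndex] + '-' + primaryImplicant[diffIndex + 1:]
--   else:
--     return primaryImplicant
-- ===== SOURCE B (Python) =====
-- def combineImplicants(impA, impB):
--   """Combines two implicants."""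
--   if impA.count('-') >= impB.count('-'):
--     primary, secondary = impA, impB
--   else:
--     primary, secondary = impB, impA
--   n = len(impA)
--   # candidate combined cube: dash wherever the inputs disagree, primary elsewhere
--   merged = ''.join(primary[i] if impA[i] == impB[i] else '-'
--                    for i in range(n)) + primary[n:]
--   if any(impA[i] != impB[i] and secondary[i] == '-' for i in range(n)):
--     return None
--   newdashes = sum(1 for i in range(n) if merged[i] == '-' and primary[i] != '-')
--   diffs = sum(1 for i in range(n) if impA[i] != impB[i])
--   if newdashes == 0 or diffs == 1:
--     return merged
--   return None
-- ===== Notes on version B (the rewrite author's own statement) =====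
-- stated objective: alternative
-- what changed: Instead of A's stateful left-to-right scan (hasDiff/diffIndex/doesCover flags with early returns) that splices a dash into the primary at the recorded diff index, B first constructs the candidate combined cube directly (dash wherever the two inputs disagree, primary character elsewhere), then validates it by counting: invalid if the secondary loses a dash at a differing position, or if the candidate adds a new dash to the primary while the cubes differ in more than one position; when valid the candidate itself is the answer, no splicing.
-- outside the precondition, e.g. on combineImplicants('00X', '11'): A returns None, B raises IndexError
import Mathlib
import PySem

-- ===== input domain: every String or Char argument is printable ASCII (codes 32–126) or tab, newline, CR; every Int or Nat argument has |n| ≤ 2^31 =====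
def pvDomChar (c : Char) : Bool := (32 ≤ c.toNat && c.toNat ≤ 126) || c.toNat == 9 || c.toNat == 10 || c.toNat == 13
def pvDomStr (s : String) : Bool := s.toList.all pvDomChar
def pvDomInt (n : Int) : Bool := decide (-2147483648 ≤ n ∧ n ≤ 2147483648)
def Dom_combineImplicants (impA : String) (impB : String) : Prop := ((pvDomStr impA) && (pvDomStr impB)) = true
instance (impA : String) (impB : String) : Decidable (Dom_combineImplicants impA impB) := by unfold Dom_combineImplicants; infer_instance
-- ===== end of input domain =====

-- B replaces A's stateful single scan (hasDiff/diffIndex/doesCover flags with early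
-- returns) by constructing the candidate combined cube directly (dash wherever the
-- inputs disagree) and then validating it by counts, returning the candidate itself
-- instead of splicing the primary (objective: alternative decomposition, no speed claim).


-- ===== PORT A =====
-- 'for i in range(len(implicant)): if implicant[i] == "-": count += 1'
def countDontCares (implicant : String) : Int :=
  (List.range implicant.toList.length).foldl
    (fun count i => if implicant.toList.getD i ' ' = '-' then count + 1 else count) 0

-- The for-loop of A, with its three state variables.  Under Pre_ every index is
-- in range, so getD with a dummy default is exact there.
def loopA (la lb pri sec : List Char) : List Nat → Bool → Int → Bool → Option String
  | [], hasDiff, diffIndex, _doesCover =>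
    if hasDiff then
      some (String.ofList (pri.take diffIndex.toNat ++ '-' :: pri.drop (diffIndex.toNat + 1)))
    else some (String.ofList pri)
  | i :: rest, hasDiff, diffIndex, doesCover =>
    if la.getD i ' ' ≠ lb.getD i ' ' then
      if sec.getD i ' ' = '-' then none
      else if pri.getD i ' ' = '-' then
        if hasDiff then none
        else loopA la lb pri sec rest hasDiff diffIndex true
      else
        if hasDiff then none
        else if pri.getD i ' ' ≠ '-' then
          if doesCover then none
          else loopA la lb pri sec rest true (i : Int) doesCover
        else loopA la lb pri sec rest hasDiff diffIndex doesCover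
    else loopA la lb pri sec rest hasDiff diffIndex doesCover

def combineImplicants (impA : String) (impB : String) : Option String :=
  let la := impA.toList
  let lb := impB.toList
  if countDontCares impA ≥ countDontCares impB then
    loopA la lb la lb (List.range la.length) false (-1) false
  else
    loopA la lb lb la (List.range la.length) false (-1) false

-- ===== PORT B =====
def combineImplicants_alt (impA : String) (impB : String) : Option String :=
  let la := impA.toList
  let lb := impB.toList
  let pri := if la.count '-' ≥ lb.count '-' then la else lb
  let sec := if la.count '-' ≥ lb.count '-' then lb else la
  let n := la.length
  let merged := ((List.range n).map
      (fun i => if la.getD i ' ' = lb.getD i ' ' then pri.getD i ' ' else '-'))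
    ++ pri.drop n
  if (List.range n).any
      (fun i => decide (la.getD i ' ' ≠ lb.getD i ' ') && decide (sec.getD i ' ' = '-')) then none
  else
    let newdashes := (List.range n).countP
        (fun i => decide (merged.getD i ' ' = '-') && decide (pri.getD i ' ' ≠ '-'))
    let diffs := (List.range n).countP (fun i => decide (la.getD i ' ' ≠ lb.getD i ' '))
    if newdashes = 0 ∨ diffs = 1 then some (String.ofList merged)
    else none

-- ===== PRECONDITION & SPEC =====
-- Pre_ excludes impB shorter than impA: there 'impB[i]' raises IndexError — in A
-- whenever the loop reaches index len(impB) (A still returns None on some such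
-- inputs via an earlier early return), and in B always, since B's merged-string
-- construction indexes impB[i] at every position of impA.
def Pre_combineImplicants (impA : String) (impB : String) : Prop :=
  impA.toList.length ≤ impB.toList.length
instance (impA : String) (impB : String) : Decidable (Pre_combineImplicants impA impB) := by
  unfold Pre_combineImplicants; infer_instance
def pvWitness_combineImplicants : String × String := ("1-0", "110")

def Spec_combineImplicants (impA : String) (impB : String) (out : Option String) : Prop := out = combineImplicants_alt impA impB
instance (impA : String) (impB : String) (out : Option String) : Decidable (Spec_combineImplicants impA impB out) := by unfold Spec_combineImplicants; infer_instance

-- ===== CLAIM (what is proved, stated in full; the proofs are below) =====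
def Claim_equal_combineImplicants : Prop := ∀ (impA : String) (impB : String), Dom_combineImplicants impA impB → Pre_combineImplicants impA impB → Spec_combineImplicants impA impB (combineImplicants impA impB)

-- ===== LEMMAS AND PROOFS =====

theorem countP_range_getD (l : List Char) :
    (List.range l.length).countP (fun i => decide (l.getD i ' ' = '-')) = l.count '-' := by
  induction l using List.reverseRecOn with
  | nil => simp
  | append_singleton l x ih =>
    rw [List.length_append, List.length_singleton, List.range_succ, List.countP_append,
        List.count_append]
    have h1 : (List.range l.length).countP (fun i => decide ((l ++ [x]).getD i ' ' = '-'))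
        = (List.range l.length).countP (fun i => decide (l.getD i ' ' = '-')) := by
      apply List.countP_congr
      intro i hi
      simp only [List.mem_range] at hi
      simp [List.getD_eq_getElem?_getD, List.getElem?_append_left hi]
    rw [h1, ih]
    simp [List.getD_eq_getElem?_getD, List.count_singleton]

theorem countDC_eq (s : String) : countDontCares s = (s.toList.count '-' : Int) := by
  unfold countDontCares
  rw [PySem.List.foldl_ite_add_one (p := fun i => s.toList.getD i ' ' = '-')]
  have h := countP_range_getD s.toList
  simp only [List.getD_eq_getElem?_getD, String.length_toList] at h
  simp [h]

theorem loopA_hasDiff (la lb pri sec : List Char) (idxs : List Nat) :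
    ∀ (d : Int) (c : Bool), loopA la lb pri sec idxs true d c =
      if (idxs.any fun i => decide (la.getD i ' ' ≠ lb.getD i ' ')) = true then none
      else some (String.ofList (pri.take d.toNat ++ '-' :: pri.drop (d.toNat + 1))) := by
  induction idxs with
  | nil => intro d c; simp [loopA]
  | cons i rest ih =>
    intro d c
    by_cases hd : la[i]?.getD ' ' = lb[i]?.getD ' ' <;>
      simp [loopA, List.getD_eq_getElem?_getD, hd, ih]

theorem loopA_cover (la lb pri sec : List Char) (idxs : List Nat) :
    ∀ (d : Int), loopA la lb pri sec idxs false d true =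
      if (idxs.any fun i => decide (la.getD i ' ' ≠ lb.getD i ' ') &&
            (decide (sec.getD i ' ' = '-') || decide (pri.getD i ' ' ≠ '-'))) = true then none
      else some (String.ofList pri) := by
  induction idxs with
  | nil => intro d; simp [loopA]
  | cons i rest ih =>
    intro d
    by_cases hd : la[i]?.getD ' ' = lb[i]?.getD ' '
    · simp [loopA, List.getD_eq_getElem?_getD, hd, ih]
    · by_cases hs : sec[i]?.getD ' ' = '-'
      · simp [loopA, List.getD_eq_getElem?_getD, hd, hs]
      · by_cases hp : pri[i]?.getD ' ' = '-'
        · simp [loopA, List.getD_eq_getElem?_getD, hd, hs, hp, ih]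
        · simp [loopA, List.getD_eq_getElem?_getD, hd, hs, hp]

theorem loopA_start (la lb pri sec : List Char) (idxs : List Nat) :
    ∀ (d : Int), loopA la lb pri sec idxs false d false =
      (let diffs := idxs.filter (fun i => decide (la.getD i ' ' ≠ lb.getD i ' '));
       let real := diffs.filter (fun i => decide (pri.getD i ' ' ≠ '-'));
       if (diffs.any fun i => decide (sec.getD i ' ' = '-')) = true then none
       else if real.length > 1 ∨ (real.length = 1 ∧ real.length < diffs.length) then none
       else if real.length = 1 then
         some (String.ofList (pri.take (real.headD 0) ++ '-' :: pri.drop (real.headD 0 + 1)))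
       else some (String.ofList pri)) := by
  induction idxs with
  | nil => intro d; simp [loopA]
  | cons i rest ih =>
    intro d
    by_cases hd : la[i]?.getD ' ' = lb[i]?.getD ' '
    · simp [loopA, List.getD_eq_getElem?_getD, hd, ih]
    · by_cases hs : sec[i]?.getD ' ' = '-'
      · simp [loopA, List.getD_eq_getElem?_getD, hd, hs]
      · by_cases hp : pri[i]?.getD ' ' = '-'
        · -- cover at i
          have hstep : loopA la lb pri sec (i::rest) false d false
              = loopA la lb pri sec rest false d true := by
            simp [loopA, List.getD_eq_getElem?_getD, hd, hs, hp]
          rw [hstep, loopA_cover]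
          simp [List.getD_eq_getElem?_getD, hd, hs, hp]
          by_cases hP1 : ∃ x ∈ rest, ¬la[x]?.getD ' ' = lb[x]?.getD ' ' ∧ sec[x]?.getD ' ' = '-'
          · have hP : ∃ x ∈ rest, ¬la[x]?.getD ' ' = lb[x]?.getD ' ' ∧
                (sec[x]?.getD ' ' = '-' ∨ ¬pri[x]?.getD ' ' = '-') := by
              obtain ⟨x, hx, h1, h2⟩ := hP1
              exact ⟨x, hx, h1, Or.inl h2⟩
            simp [hP, hP1]
          · by_cases hR : ∃ x ∈ rest, ¬la[x]?.getD ' ' = lb[x]?.getD ' ' ∧ ¬pri[x]?.getD ' ' = '-'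
            · have hP : ∃ x ∈ rest, ¬la[x]?.getD ' ' = lb[x]?.getD ' ' ∧
                  (sec[x]?.getD ' ' = '-' ∨ ¬pri[x]?.getD ' ' = '-') := by
                obtain ⟨x, hx, h1, h2⟩ := hR
                exact ⟨x, hx, h1, Or.inr h2⟩
              have hRD : (List.filter (fun a => !decide (pri[a]?.getD ' ' = '-') &&
                    !decide (la[a]?.getD ' ' = lb[a]?.getD ' ')) rest).length ≤
                  (List.filter (fun i => !decide (la[i]?.getD ' ' = lb[i]?.getD ' ')) rest).length := by
                rw [← List.countP_eq_length_filter, ← List.countP_eq_length_filter]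
                apply List.countP_mono_left
                intro a ha hc
                simp only [Bool.and_eq_true] at hc
                exact hc.2
              have hlen : 0 < (List.filter (fun a => !decide (pri[a]?.getD ' ' = '-') &&
                    !decide (la[a]?.getD ' ' = lb[a]?.getD ' ')) rest).length := by
                obtain ⟨x, hx, h1, h2⟩ := hR
                have hm : x ∈ List.filter (fun a => !decide (pri[a]?.getD ' ' = '-') &&
                    !decide (la[a]?.getD ' ' = lb[a]?.getD ' ')) rest := by
                  rw [List.mem_filter]
                  simp [hx, h1, h2]
                exact List.length_pos_of_mem hm
              have hcond : 1 < (List.filter (fun a => !decide (pri[a]?.getD ' ' = '-') &&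
                    !decide (la[a]?.getD ' ' = lb[a]?.getD ' ')) rest).length ∨
                  ((List.filter (fun a => !decide (pri[a]?.getD ' ' = '-') &&
                    !decide (la[a]?.getD ' ' = lb[a]?.getD ' ')) rest).length = 1 ∧
                   (List.filter (fun a => !decide (pri[a]?.getD ' ' = '-') &&
                    !decide (la[a]?.getD ' ' = lb[a]?.getD ' ')) rest).length ≤
                   (List.filter (fun i => !decide (la[i]?.getD ' ' = lb[i]?.getD ' ')) rest).length) := by
                omega
              rw [if_pos hP, if_neg hP1, if_pos hcond]
            · have hP : ¬ ∃ x ∈ rest, ¬la[x]?.getD ' ' = lb[x]?.getD ' ' ∧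
                  (sec[x]?.getD ' ' = '-' ∨ ¬pri[x]?.getD ' ' = '-') := by
                rintro ⟨x, hx, h1, h2 | h2⟩
                · exact hP1 ⟨x, hx, h1, h2⟩
                · exact hR ⟨x, hx, h1, h2⟩
              have hR0 : (List.filter (fun a => !decide (pri[a]?.getD ' ' = '-') &&
                  !decide (la[a]?.getD ' ' = lb[a]?.getD ' ')) rest) = [] := by
                rw [List.filter_eq_nil_iff]
                intro a ha hc
                simp only [Bool.and_eq_true, Bool.not_eq_eq_eq_not, Bool.not_true,
                  decide_eq_false_iff_not] at hc
                exact hR ⟨a, ha, hc.2, hc.1⟩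
              simp [hP, hP1, hR0]
        · -- real difference at i
          have hstep : loopA la lb pri sec (i::rest) false d false
              = loopA la lb pri sec rest true (i : Int) false := by
            simp [loopA, List.getD_eq_getElem?_getD, hd, hs, hp]
          rw [hstep, loopA_hasDiff]
          simp [List.getD_eq_getElem?_getD, hd, hs, hp]
          by_cases hAny : ∃ x ∈ rest, ¬la[x]?.getD ' ' = lb[x]?.getD ' '
          · rw [if_pos hAny]
            by_cases hP1 : ∃ x ∈ rest, ¬la[x]?.getD ' ' = lb[x]?.getD ' ' ∧ sec[x]?.getD ' ' = '-'
            · rw [if_pos hP1]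
            · rw [if_neg hP1]
              by_cases hPR : ∃ x ∈ rest, ¬pri[x]?.getD ' ' = '-' ∧ ¬la[x]?.getD ' ' = lb[x]?.getD ' '
              · rw [if_pos (Or.inl hPR)]
              · have hR0 : (List.filter (fun a => !decide (pri[a]?.getD ' ' = '-') &&
                    !decide (la[a]?.getD ' ' = lb[a]?.getD ' ')) rest).length = 0 := by
                  rw [List.length_eq_zero_iff, List.filter_eq_nil_iff]
                  intro a ha hc
                  simp only [Bool.and_eq_true, Bool.not_eq_eq_eq_not, Bool.not_true,
                    decide_eq_false_iff_not] at hc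
                  exact hPR ⟨a, ha, hc.1, hc.2⟩
                have hD0 : 0 < (List.filter (fun i =>
                    !decide (la[i]?.getD ' ' = lb[i]?.getD ' ')) rest).length := by
                  obtain ⟨x, hx, hdx⟩ := hAny
                  have hm : x ∈ List.filter (fun i =>
                      !decide (la[i]?.getD ' ' = lb[i]?.getD ' ')) rest := by
                    rw [List.mem_filter]
                    simp [hx, hdx]
                  exact List.length_pos_of_mem hm
                have hall : ∀ a ∈ rest, ¬pri[a]?.getD ' ' = '-' → la[a]?.getD ' ' = lb[a]?.getD ' ' := by
                  intro a ha hpa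
                  by_contra hne
                  exact hPR ⟨a, ha, hpa, hne⟩
                rw [if_pos (Or.inr ⟨hall, by omega⟩)]
          · rw [if_neg hAny]
            have hP1 : ¬ ∃ x ∈ rest, ¬la[x]?.getD ' ' = lb[x]?.getD ' ' ∧ sec[x]?.getD ' ' = '-' := by
              rintro ⟨x, hx, h1, _⟩
              exact hAny ⟨x, hx, h1⟩
            have hall : ∀ a ∈ rest, ¬pri[a]?.getD ' ' = '-' → la[a]?.getD ' ' = lb[a]?.getD ' ' := by
              intro a ha _
              by_contra hne
              exact hAny ⟨a, ha, hne⟩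
            have hD0 : (List.filter (fun i =>
                !decide (la[i]?.getD ' ' = lb[i]?.getD ' ')) rest).length = 0 := by
              rw [List.length_eq_zero_iff, List.filter_eq_nil_iff]
              intro a ha hc
              simp only [Bool.not_eq_eq_eq_not, Bool.not_true, decide_eq_false_iff_not] at hc
              exact hAny ⟨a, ha, hc⟩
            have hcond : ¬ ((∃ x ∈ rest, ¬pri[x]?.getD ' ' = '-' ∧ ¬la[x]?.getD ' ' = lb[x]?.getD ' ') ∨
                ((∀ a ∈ rest, ¬pri[a]?.getD ' ' = '-' → la[a]?.getD ' ' = lb[a]?.getD ' ') ∧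
                 (List.filter (fun a => !decide (pri[a]?.getD ' ' = '-') &&
                   !decide (la[a]?.getD ' ' = lb[a]?.getD ' ')) rest).length <
                 (List.filter (fun i => !decide (la[i]?.getD ' ' = lb[i]?.getD ' ')) rest).length)) := by
              rintro (⟨x, hx, _, h2⟩ | ⟨_, hlt⟩)
              · exact hAny ⟨x, hx, h2⟩
              · omega
            rw [if_neg hP1, if_neg hcond, if_pos hall]

-- The candidate cube of B, as a list
def mergedOf (la lb pri : List Char) : List Char :=
  ((List.range la.length).map
      (fun i => if la.getD i ' ' = lb.getD i ' ' then pri.getD i ' ' else '-'))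
    ++ pri.drop la.length

theorem mergedOf_length (la lb pri : List Char) (hn : la.length ≤ pri.length) :
    (mergedOf la lb pri).length = pri.length := by
  unfold mergedOf
  simp [List.length_append]
  omega

theorem mergedOf_getElem_lt (la lb pri : List Char) (i : Nat) (hi : i < la.length)
    (h : i < (mergedOf la lb pri).length) :
    (mergedOf la lb pri)[i] = if la.getD i ' ' = lb.getD i ' ' then pri.getD i ' ' else '-' := by
  unfold mergedOf
  rw [List.getElem_append_left (by simpa using hi)]
  simp [hi]

theorem mergedOf_getElem_ge (la lb pri : List Char) (i : Nat) (hi : la.length ≤ i)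
    (h : i < (mergedOf la lb pri).length) (hp : i < pri.length) :
    (mergedOf la lb pri)[i] = pri[i] := by
  unfold mergedOf
  rw [List.getElem_append_right (by simpa using hi)]
  simp only [List.length_map, List.length_range, List.getElem_drop]
  congr 1
  omega

-- if all differing positions carry a primary dash, the candidate IS the primary
theorem mergedOf_eq_pri (la lb pri : List Char) (hn : la.length ≤ pri.length)
    (hall : ∀ i, i < la.length → la.getD i ' ' ≠ lb.getD i ' ' → pri.getD i ' ' = '-') :
    mergedOf la lb pri = pri := by
  apply List.ext_getElem (mergedOf_length la lb pri hn)
  intro i h1 h2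
  by_cases hi : i < la.length
  · rw [mergedOf_getElem_lt la lb pri i hi h1]
    by_cases hd : la.getD i ' ' = lb.getD i ' '
    · simp only [List.getD_eq_getElem?_getD] at hd ⊢
      simp [hd, List.getElem?_eq_getElem h2]
    · have hpd := hall i hi hd
      simp only [List.getD_eq_getElem?_getD] at hd hpd ⊢
      rw [List.getElem?_eq_getElem h2] at hpd
      simp only [Option.getD_some] at hpd
      simp [hd, hpd]
  · exact mergedOf_getElem_ge la lb pri i (by omega) h1 h2

-- if j is the ONLY differing position, the candidate is the primary with '-' spliced at j
theorem mergedOf_eq_splice (la lb pri : List Char) (hn : la.length ≤ pri.length)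
    (j : Nat) (hj : j < la.length)
    (honly : ∀ i, i < la.length → la.getD i ' ' ≠ lb.getD i ' ' → i = j)
    (hdj : la.getD j ' ' ≠ lb.getD j ' ') :
    mergedOf la lb pri = pri.take j ++ '-' :: pri.drop (j + 1) := by
  have hjp : j < pri.length := lt_of_lt_of_le hj hn
  apply List.ext_getElem
  · rw [mergedOf_length la lb pri hn]
    simp
    omega
  intro i h1 h2
  have hmi : i < pri.length := by rw [mergedOf_length la lb pri hn] at h1; exact h1
  have hrhs : (pri.take j ++ '-' :: pri.drop (j + 1))[i] =
      if i = j then '-' else pri[i] := by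
    rcases lt_trichotomy i j with hij | hij | hij
    · rw [List.getElem_append_left (by simp; omega)]
      simp [List.getElem_take, Nat.ne_of_lt hij]
    · subst hij
      rw [List.getElem_append_right (by simp)]
      have hm : min i pri.length = i := Nat.min_eq_left (le_of_lt hjp)
      simp [hm]
    · rw [List.getElem_append_right (by simp; omega)]
      have hlen : (pri.take j).length = j := by simp [Nat.min_eq_left (le_of_lt hjp)]
      rw [List.getElem_cons]
      rw [dif_neg (by omega : ¬ i - (pri.take j).length = 0)]
      simp only [List.getElem_drop, hlen]
      rw [if_neg (by omega : ¬ i = j)]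
      congr 1
      omega
  rw [hrhs]
  by_cases hi : i < la.length
  · rw [mergedOf_getElem_lt la lb pri i hi h1]
    by_cases hd : la.getD i ' ' = lb.getD i ' '
    · have hij : ¬ i = j := by rintro rfl; exact hdj hd
      simp only [List.getD_eq_getElem?_getD] at hd ⊢
      simp [hd, hij, List.getElem?_eq_getElem hmi]
    · rw [if_neg hd, if_pos (honly i hi hd)]
  · have hij : ¬ i = j := by omega
    rw [if_neg hij]
    exact mergedOf_getElem_ge la lb pri i (by omega) h1 hmi

-- the bridge: B's merge-and-validate body equals the filter characterization of A's loop
theorem bridge (la lb pri sec : List Char) (hn : la.length ≤ pri.length) :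
    (let n := la.length
     let merged := mergedOf la lb pri
     if (List.range n).any
        (fun i => decide (la.getD i ' ' ≠ lb.getD i ' ') && decide (sec.getD i ' ' = '-')) then none
     else
       let newdashes := (List.range n).countP
          (fun i => decide (merged.getD i ' ' = '-') && decide (pri.getD i ' ' ≠ '-'))
       let diffs := (List.range n).countP (fun i => decide (la.getD i ' ' ≠ lb.getD i ' '))
       if newdashes = 0 ∨ diffs = 1 then some (String.ofList merged)
       else none)
    = (let diffs := (List.range la.length).filter (fun i => decide (la.getD i ' ' ≠ lb.getD i ' '));
       let real := diffs.filter (fun i => decide (pri.getD i ' ' ≠ '-'));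
       if (diffs.any fun i => decide (sec.getD i ' ' = '-')) = true then none
       else if real.length > 1 ∨ (real.length = 1 ∧ real.length < diffs.length) then none
       else if real.length = 1 then
         some (String.ofList (pri.take (real.headD 0) ++ '-' :: pri.drop (real.headD 0 + 1)))
       else some (String.ofList pri)) := by
  simp only []
  set n := la.length with hn_def
  set diffsL := (List.range n).filter (fun i => decide (la.getD i ' ' ≠ lb.getD i ' ')) with hdiffs
  set realL := diffsL.filter (fun i => decide (pri.getD i ' ' ≠ '-')) with hreal
  -- the two "any" conditions agree
  have hanyEq : (diffsL.any fun i => decide (sec.getD i ' ' = '-'))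
      = (List.range n).any
          (fun i => decide (la.getD i ' ' ≠ lb.getD i ' ') && decide (sec.getD i ' ' = '-')) := by
    rw [hdiffs, List.any_filter]
  -- diffs count
  have hdcount : (List.range n).countP (fun i => decide (la.getD i ' ' ≠ lb.getD i ' '))
      = diffsL.length := by
    rw [hdiffs, List.countP_eq_length_filter]
  -- newdashes count
  have hrcount : (List.range n).countP
      (fun i => decide ((mergedOf la lb pri).getD i ' ' = '-') && decide (pri.getD i ' ' ≠ '-'))
      = realL.length := by
    rw [hreal, hdiffs, ← List.countP_eq_length_filter, List.countP_filter]
    apply List.countP_congr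
    intro i hi
    rw [List.mem_range] at hi
    have hmlen : i < (mergedOf la lb pri).length := by rw [mergedOf_length la lb pri hn]; omega
    have hget : (mergedOf la lb pri).getD i ' '
        = if la.getD i ' ' = lb.getD i ' ' then pri.getD i ' ' else '-' := by
      rw [List.getD_eq_getElem?_getD, List.getElem?_eq_getElem hmlen]
      simp [mergedOf_getElem_lt la lb pri i hi hmlen]
    simp only [List.getD_eq_getElem?_getD] at hget ⊢
    rw [hget]
    by_cases hd : la[i]?.getD ' ' = lb[i]?.getD ' '
    · by_cases hp : pri[i]?.getD ' ' = '-' <;> simp [hd, hp]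
    · by_cases hp : pri[i]?.getD ' ' = '-' <;> simp [hd, hp]
  have hrle : realL.length ≤ diffsL.length := List.length_filter_le _ _
  rw [← hanyEq]
  by_cases hany : (diffsL.any fun i => decide (sec.getD i ' ' = '-')) = true
  · rw [if_pos hany, if_pos hany]
  · rw [if_neg hany, if_neg hany, hrcount, hdcount]
    by_cases hbad : realL.length > 1 ∨ (realL.length = 1 ∧ realL.length < diffsL.length)
    · rw [if_pos hbad, if_neg (by omega : ¬ (realL.length = 0 ∨ diffsL.length = 1))]
    · rw [if_neg hbad]
      by_cases hr1 : realL.length = 1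
      · -- exactly one real diff, no covers: d = 1
        have hd1 : diffsL.length = 1 := by omega
        obtain ⟨j, hj⟩ := List.length_eq_one_iff.mp hd1
        have hrj : realL = [j] := by
          have hsub : realL.Sublist [j] := by rw [hreal, hj]; exact List.filter_sublist
          exact hsub.eq_of_length (by rw [hr1]; rfl)
        have hjmem : j ∈ diffsL := by rw [hj]; exact List.mem_singleton_self j
        rw [hdiffs, List.mem_filter, List.mem_range] at hjmem
        have hjlt : j < n := hjmem.1
        have hjd : la.getD j ' ' ≠ lb.getD j ' ' := by simpa using hjmem.2
        have honly : ∀ i, i < n → la.getD i ' ' ≠ lb.getD i ' ' → i = j := by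
          intro i hi hdi
          have : i ∈ diffsL := by
            rw [hdiffs, List.mem_filter, List.mem_range]
            exact ⟨hi, by simpa using hdi⟩
          rw [hj] at this
          simpa using this
        rw [if_pos (Or.inr hd1), if_pos hr1, hrj]
        simp only [List.headD]
        rw [mergedOf_eq_splice la lb pri hn j hjlt honly hjd]
      · -- no real diffs
        have hr0 : realL.length = 0 := by omega
        rw [if_pos (Or.inl hr0), if_neg hr1]
        have hall : ∀ i, i < n → la.getD i ' ' ≠ lb.getD i ' ' → pri.getD i ' ' = '-' := by
          intro i hi hdi
          by_contra hp
          have : i ∈ realL := by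
            rw [hreal, hdiffs, List.mem_filter, List.mem_filter, List.mem_range]
            exact ⟨⟨hi, by simpa using hdi⟩, by simpa using hp⟩
          rw [List.length_eq_zero_iff] at hr0
          rw [hr0] at this
          simp at this
        rw [mergedOf_eq_pri la lb pri hn hall]

-- ===== VERDICT (by name: the statement is the Claim_ definition above) =====
theorem combineImplicants_spec : Claim_equal_combineImplicants := by
  intro impA impB _hdom hpre
  unfold Spec_combineImplicants combineImplicants combineImplicants_alt
  have hc : (countDontCares impA ≥ countDontCares impB)
      ↔ (impA.toList.count '-' ≥ impB.toList.count '-') := by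
    rw [countDC_eq, countDC_eq]
    exact_mod_cast Iff.rfl
  unfold Pre_combineImplicants at hpre
  by_cases h : impA.toList.count '-' ≥ impB.toList.count '-'
  · rw [if_pos (hc.mpr h), loopA_start]
    have hb := bridge impA.toList impB.toList impA.toList impB.toList (le_refl _)
    simp only [mergedOf] at hb
    simp only [if_pos h]
    exact hb.symm
  · rw [if_neg (fun hx => h (hc.mp hx)), loopA_start]
    have hb := bridge impA.toList impB.toList impB.toList impA.toList hpre
    simp only [mergedOf] at hb
    simp only [if_neg h]
    exact hb.symm
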